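-- pv_equiv track=rewrite | github.com/kart2k15/Big-Data--Bits_please | Task2.py | check_subjects
-- ===== SOURCE A (Python) =====
-- def check_subjects(value):
--     subjects = ['math', 'algebra','geometry','science','biology','physics','chemistry','geography','history',\
--                 'citizenship','physical education','p.e','art','music','business','economics','social',\
--                 'english','teaching','film','health']
--     for subject in subjects:
--         if subject in value.lower():
--             return True
--     return False
-- ===== SOURCE B (Python) =====
-- def check_subjects(value):
--     subjects = ['math', 'algebra','geometry','science','biology','physics','chemistry','geography','history',
--                 'citizenship','physical education','p.e','art','music','business','economics','social',
--                 'english','teaching','film','health']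
--     v = value.lower()
--     for i in range(len(v)):
--         for s in subjects:
--             if v.startswith(s, i):
--                 return True
--     return False
-- ===== Notes on version B (the rewrite author's own statement) =====
-- stated objective: alternative
-- what changed: B makes a single left-to-right pass over value.lower(), testing at each position whether any of the 21 subjects starts there, instead of A's 21 independent full substring scans (one per subject).
import Mathlib
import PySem

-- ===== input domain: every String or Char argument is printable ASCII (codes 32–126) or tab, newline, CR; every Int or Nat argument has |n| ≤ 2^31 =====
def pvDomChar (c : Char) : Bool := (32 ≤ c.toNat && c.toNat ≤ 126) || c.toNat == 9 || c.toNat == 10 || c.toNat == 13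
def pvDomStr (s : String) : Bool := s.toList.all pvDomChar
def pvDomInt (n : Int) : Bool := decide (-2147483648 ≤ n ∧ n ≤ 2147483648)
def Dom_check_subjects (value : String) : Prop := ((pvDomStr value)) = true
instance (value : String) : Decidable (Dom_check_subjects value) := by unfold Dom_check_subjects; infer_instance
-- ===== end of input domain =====

-- B changes the traversal: one pass over value.lower() testing each position for any subject prefix,
-- instead of A's one full substring scan per subject ("alternative"; same results).

-- the fixed subject list, as char lists
def pvSubjects : List (List Char) :=
  ["math".toList, "algebra".toList, "geometry".toList, "science".toList, "biology".toList,
   "physics".toList, "chemistry".toList, "geography".toList, "history".toList,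
   "citizenship".toList, "physical education".toList, "p.e".toList, "art".toList,
   "music".toList, "business".toList, "economics".toList, "social".toList,
   "english".toList, "teaching".toList, "film".toList, "health".toList]

-- ===== PORT A =====
-- A's loop: for subject in subjects: if subject in value.lower(): return True; return False
def checkLoopA (v : List Char) : List (List Char) → Bool
  | [] => false
  | s :: rest => if PySem.Chars.isIn s v then true else checkLoopA v rest

def check_subjects (value : String) : Bool :=
  checkLoopA (PySem.Chars.lower value.toList) pvSubjects

-- ===== PORT B =====
-- B's scan: for i in range(len(v)): for s in subjects: if v.startswith(s, i): return True
-- (recursion over the suffixes of v = the positions i; startswith at i = prefix of the suffix)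
def scanB (subs : List (List Char)) : List Char → Bool
  | [] => false
  | c :: rest =>
      if subs.any (fun s => PySem.Chars.startswith (c :: rest) s) then true
      else scanB subs rest

def check_subjects_alt (value : String) : Bool :=
  scanB pvSubjects (PySem.Chars.lower value.toList)

-- ===== PRECONDITION & SPEC =====
def Spec_check_subjects (value : String) (out : Bool) : Prop := out = check_subjects_alt value
instance (value : String) (out : Bool) : Decidable (Spec_check_subjects value out) := by unfold Spec_check_subjects; infer_instance

-- ===== CLAIM (what is proved, stated in full; the proofs are below) =====
def Claim_equal_check_subjects : Prop := ∀ (value : String), Dom_check_subjects value → Spec_check_subjects value (check_subjects value)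

-- ===== LEMMAS AND PROOFS =====

theorem checkLoopA_eq_any (v : List Char) (subs : List (List Char)) :
    checkLoopA v subs = subs.any (fun s => PySem.Chars.isIn s v) := by
  induction subs with
  | nil => rfl
  | cons s rest ih =>
      simp only [checkLoopA, List.any_cons, ih]
      by_cases h : PySem.Chars.isIn s v = true <;> simp [h]

theorem scanB_iff (subs : List (List Char)) (hne : ∀ s ∈ subs, s ≠ []) (v : List Char) :
    scanB subs v = true ↔ ∃ s ∈ subs, ∃ j, s <+: v.drop j := by
  induction v with
  | nil =>
      simp only [scanB]
      constructor
      · intro h; cases h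
      · rintro ⟨s, hs, j, hp⟩
        simp only [List.drop_nil] at hp
        exact absurd (List.prefix_nil.mp hp) (hne s hs)
  | cons c rest ih =>
      rw [scanB]
      by_cases h : subs.any (fun s => PySem.Chars.startswith (c :: rest) s) = true
      · rw [if_pos h]
        constructor
        · intro _
          obtain ⟨s, hs, hp⟩ := List.any_eq_true.mp h
          exact ⟨s, hs, 0, by simpa using (PySem.Chars.startswith_iff _ _).mp hp⟩
        · intro _; rfl
      · rw [if_neg h, ih]
        constructor
        · rintro ⟨s, hs, j, hp⟩; exact ⟨s, hs, j + 1, by simpa using hp⟩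
        · rintro ⟨s, hs, j, hp⟩
          cases j with
          | zero =>
              exfalso
              exact h (List.any_eq_true.mpr ⟨s, hs, (PySem.Chars.startswith_iff _ _).mpr (by simpa using hp)⟩)
          | succ j => exact ⟨s, hs, j, by simpa using hp⟩

theorem pvSubjects_ne_nil : ∀ s ∈ pvSubjects, s ≠ [] := by decide

-- ===== VERDICT (by name: the statement is the Claim_ definition above) =====
theorem check_subjects_spec : Claim_equal_check_subjects := by
  intro value _
  unfold Spec_check_subjects check_subjects check_subjects_alt
  rw [checkLoopA_eq_any]
  rw [Bool.eq_iff_iff]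
  rw [List.any_eq_true]
  rw [scanB_iff pvSubjects pvSubjects_ne_nil]
  constructor
  · rintro ⟨s, hs, hin⟩
    obtain ⟨j, hp⟩ := (PySem.Chars.exists_prefix_drop_iff_isIn s _).mpr hin
    exact ⟨s, hs, j, hp⟩
  · rintro ⟨s, hs, j, hp⟩
    exact ⟨s, hs, (PySem.Chars.exists_prefix_drop_iff_isIn s _).mp ⟨j, hp⟩⟩
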